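-- pv_equiv track=rewrite | github.com/mhaig/adventofcode | 2020/day07/day07.py | find_holders
-- ===== SOURCE A (Python) =====
-- def find_holders(bag_name, bag_dict):
--     holders = []
--     for k,v in bag_dict.items():
--         if bag_name in v:
--             if k not in holders:
--                 holders.append(k)
--                 holders.extend(find_holders(k, bag_dict))
--
--     return holders
--
-- holders = []
-- ===== SOURCE B (Python) =====
-- def find_holders(bag_name, bag_dict):
--     # Precompute a reverse child->parents adjacency map once, then DFS over it.
--     parents = {}
--     for k, v in bag_dict.items():
--         for c in v:
--             ps = parents.setdefault(c, [])
--             if k not in ps: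
--                 ps.append(k)
--
--     def walk(bag):
--         out = []
--         for p in parents.get(bag, []):
--             if p not in out:
--                 out.append(p)
--                 out.extend(walk(p))
--         return out
--
--     return walk(bag_name)
-- ===== Notes on version B (the rewrite author's own statement) =====
-- stated objective: alternative
-- what changed: A rescans every dict entry and tests 'bag_name in v' on every recursive call; B precomputes a reverse child->parents adjacency map once and the DFS then only iterates over each bag's actual parents (not measurably faster on the benchmark family, where the map build dominates a single call).
-- outside the precondition, e.g. on find_holders('a', {'b': ['a'], 'a': ['b']}): A raises RecursionError, B raises RecursionError
import Mathlib
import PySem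

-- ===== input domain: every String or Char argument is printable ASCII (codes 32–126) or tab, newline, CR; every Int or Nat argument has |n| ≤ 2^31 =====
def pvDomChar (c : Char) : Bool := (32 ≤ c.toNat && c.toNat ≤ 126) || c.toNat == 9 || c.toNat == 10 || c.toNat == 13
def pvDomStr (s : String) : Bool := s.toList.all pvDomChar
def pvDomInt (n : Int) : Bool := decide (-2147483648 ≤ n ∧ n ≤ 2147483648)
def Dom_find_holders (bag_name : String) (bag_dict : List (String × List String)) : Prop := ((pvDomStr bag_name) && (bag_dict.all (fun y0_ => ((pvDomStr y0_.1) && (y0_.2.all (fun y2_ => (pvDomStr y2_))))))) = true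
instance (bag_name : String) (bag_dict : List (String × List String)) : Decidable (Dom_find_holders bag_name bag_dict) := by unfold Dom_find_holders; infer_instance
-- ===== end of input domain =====

-- B replaces A's per-call scan of the whole dict by a reverse child→parents map built once,
-- then the same DFS over that map (objective: alternative traversal; not claimed faster); return values only, neither mutates its input.

-- ===== PORT A =====
-- A recurses with no visited set; on Pre_ inputs every parent chain consists of distinct keys,
-- so recursion depth is ≤ number of entries; both ports carry the same fuel (bag_dict.length + 1),
-- which is exhausted only outside Pre_ (where Python A raises RecursionError).
def findAuxA (bag_dict : List (String × List String)) : Nat → String → List String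
  | 0, _ => []
  | fuel + 1, bag_name =>
      bag_dict.foldl (fun holders kv =>
        if bag_name ∈ kv.2 then
          if kv.1 ∈ holders then holders
          else (holders ++ [kv.1]) ++ findAuxA bag_dict fuel kv.1
        else holders) []

def find_holders (bag_name : String) (bag_dict : List (String × List String)) : List String :=
  findAuxA bag_dict (bag_dict.length + 1) bag_name

-- ===== PORT B =====
-- reverse map: for each entry (k, v), for each child c in v, append k once to parents[c]
def buildRev (bag_dict : List (String × List String)) : PySem.Dict String (List String) :=
  bag_dict.foldl (fun rev kv =>
    kv.2.foldl (fun rev c =>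
      let ps := rev.getD c []
      if kv.1 ∈ ps then rev else rev.insert c (ps ++ [kv.1])) rev) PySem.Dict.empty

def walkB (rev : PySem.Dict String (List String)) : Nat → String → List String
  | 0, _ => []
  | fuel + 1, bag =>
      (rev.getD bag []).foldl (fun out p =>
        if p ∈ out then out
        else (out ++ [p]) ++ walkB rev fuel p) []

def find_holders_alt (bag_name : String) (bag_dict : List (String × List String)) : List String :=
  walkB (buildRev bag_dict) (bag_dict.length + 1) bag_name

-- ===== PRECONDITION & SPEC =====
-- direct parents of c: the keys whose child list contains c, in insertion order
def parentsOf (bag_dict : List (String × List String)) (c : String) : List String :=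
  (bag_dict.filter (fun kv => c ∈ kv.2)).map Prod.fst

def ancStep (bag_dict : List (String × List String)) (s : List String) : List String :=
  (s ++ s.flatMap (parentsOf bag_dict)).dedup

def ancestors (bag_dict : List (String × List String)) (x : String) : List String :=
  (ancStep bag_dict)^[bag_dict.length + 1] (parentsOf bag_dict x)

-- Pre_ excludes association lists with duplicate keys (an artefact of the dict representation:
-- Python's dict collapses them, the list does not) and inputs on which the parent graph reachable
-- from bag_name contains a cycle, where Python A (and B) raise RecursionError.
def Pre_find_holders (bag_name : String) (bag_dict : List (String × List String)) : Prop :=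
  (bag_dict.map Prod.fst).Nodup ∧
  ∀ x ∈ ancestors bag_dict bag_name, x ∉ ancestors bag_dict x

instance (bag_name : String) (bag_dict : List (String × List String)) : Decidable (Pre_find_holders bag_name bag_dict) := by unfold Pre_find_holders; infer_instance

def pvWitness_find_holders : String × (List (String × List String)) :=
  ("shiny gold", [("bright white", ["shiny gold"]), ("muted yellow", ["shiny gold", "bright white"])])

def Spec_find_holders (bag_name : String) (bag_dict : List (String × List String)) (out : List String) : Prop := out = find_holders_alt bag_name bag_dict
instance (bag_name : String) (bag_dict : List (String × List String)) (out : List String) : Decidable (Spec_find_holders bag_name bag_dict out) := by unfold Spec_find_holders; infer_instance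

-- ===== CLAIM (what is proved, stated in full; the proofs are below) =====
def Claim_equal_find_holders : Prop := ∀ (bag_name : String) (bag_dict : List (String × List String)), Dom_find_holders bag_name bag_dict → Pre_find_holders bag_name bag_dict → Spec_find_holders bag_name bag_dict (find_holders bag_name bag_dict)

-- ===== LEMMAS AND PROOFS =====

-- buildRev's inner loop appends k to parents[c] exactly when c ∈ v and k is not there yet
theorem innerFold_getD (k : String) (c : String) (v : List String)
    (rev : PySem.Dict String (List String)) :
    (v.foldl (fun rev c' =>
      let ps := rev.getD c' []
      if k ∈ ps then rev else rev.insert c' (ps ++ [k])) rev).getD c []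
    = rev.getD c [] ++ (if c ∈ v ∧ k ∉ rev.getD c [] then [k] else []) := by
  induction v generalizing rev with
  | nil => simp
  | cons c' v' ih =>
    simp only [List.foldl_cons]
    by_cases hk : k ∈ rev.getD c' []
    · rw [if_pos hk, ih]
      by_cases hc : c' = c
      · subst hc; simp [hk]
      · simp [List.mem_cons, Ne.symm hc]
    · rw [if_neg hk, ih, PySem.Dict.getD_insert]
      by_cases hc : c' = c
      · subst hc; simp [hk]
      · simp only [if_neg (Ne.symm hc)]
        simp [List.mem_cons, Ne.symm hc]

-- buildRev's outer loop, generalized over the accumulated dict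
theorem outerFold_getD (c : String) (d : List (String × List String))
    (rev : PySem.Dict String (List String))
    (hnd : (d.map Prod.fst).Nodup) (h : ∀ kv ∈ d, kv.1 ∉ rev.getD c []) :
    (d.foldl (fun rev kv =>
      kv.2.foldl (fun rev c' =>
        let ps := rev.getD c' []
        if kv.1 ∈ ps then rev else rev.insert c' (ps ++ [kv.1])) rev) rev).getD c []
    = rev.getD c [] ++ parentsOf d c := by
  induction d generalizing rev with
  | nil => simp [parentsOf]
  | cons kv d' ih =>
    simp only [List.foldl_cons]
    have hk : kv.1 ∉ rev.getD c [] := h kv (List.mem_cons_self ..)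
    have hnd' : (d'.map Prod.fst).Nodup := (List.nodup_cons.mp hnd).2
    have hkd : kv.1 ∉ d'.map Prod.fst := (List.nodup_cons.mp hnd).1
    have h' : ∀ kv' ∈ d', kv'.1 ∉ (kv.2.foldl (fun rev c' =>
        let ps := rev.getD c' []
        if kv.1 ∈ ps then rev else rev.insert c' (ps ++ [kv.1])) rev).getD c [] := by
      intro kv' hkv'
      rw [innerFold_getD]
      simp only [hk, not_false_iff, and_true]
      intro hmem
      rcases List.mem_append.mp hmem with h1 | h1
      · exact h kv' (List.mem_cons_of_mem _ hkv') h1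
      · by_cases hc : c ∈ kv.2
        · rw [if_pos hc] at h1
          have heq : kv'.1 = kv.1 := List.mem_singleton.mp h1
          exact hkd (heq ▸ List.mem_map_of_mem hkv')
        · rw [if_neg hc] at h1; exact absurd h1 (List.not_mem_nil)
    rw [ih _ hnd' h', innerFold_getD]
    simp only [hk, not_false_iff, and_true]
    by_cases hc : c ∈ kv.2
    · simp [hc, parentsOf, List.append_assoc]
    · simp [hc, parentsOf]

-- the reverse map looks up exactly the direct-parents list, in dict order
theorem buildRev_getD (bag_dict : List (String × List String)) (c : String)
    (hnd : (bag_dict.map Prod.fst).Nodup) :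
    (buildRev bag_dict).getD c [] = parentsOf bag_dict c := by
  unfold buildRev
  rw [outerFold_getD c bag_dict PySem.Dict.empty hnd (by simp [PySem.Dict.getD_empty])]
  simp [PySem.Dict.getD_empty]

-- A's scan of the whole dict guarded by 'bag ∈ v' = a fold over the direct-parents list
theorem foldl_parents (d : List (String × List String)) (bag : String)
    (g : List String → String → List String) (init : List String) :
    d.foldl (fun h kv => if bag ∈ kv.2 then g h kv.1 else h) init
      = (parentsOf d bag).foldl g init := by
  induction d generalizing init with
  | nil => rfl
  | cons kv d' ih =>
    by_cases hc : bag ∈ kv.2 <;> simp [parentsOf, hc, ih]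

theorem walk_eq_find (bag_dict : List (String × List String))
    (hnd : (bag_dict.map Prod.fst).Nodup) (fuel : Nat) (bag : String) :
    findAuxA bag_dict fuel bag = walkB (buildRev bag_dict) fuel bag := by
  induction fuel generalizing bag with
  | zero => rfl
  | succ fuel ih =>
    show bag_dict.foldl _ [] = _
    rw [foldl_parents bag_dict bag
      (fun h k => if k ∈ h then h else (h ++ [k]) ++ findAuxA bag_dict fuel k) []]
    show _ = (((buildRev bag_dict).getD bag []).foldl _ [])
    rw [buildRev_getD bag_dict bag hnd]
    simp only [ih]

-- ===== VERDICT (by name: the statement is the Claim_ definition above) =====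
theorem find_holders_spec : Claim_equal_find_holders := by
  intro bag_name bag_dict _ hpre
  unfold Spec_find_holders find_holders find_holders_alt
  exact walk_eq_find bag_dict hpre.1 (bag_dict.length + 1) bag_name
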